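-- pv_equiv track=rewrite | github.com/FredericDT/route-views-rib-to-asn-prefix-dictionary | main.py | merge_as_routes
-- ===== SOURCE A (Python) =====
-- def merge_as_routes(a, b):
--     r = {}
--     for i in a.keys() | b.keys():
--         if i in a:
--             if i in b:
--                 r[i] = a[i] | b[i]
--             else:
--                 r[i] = a[i]
--         else:
--             r[i] = b[i]
--     return r
-- ===== SOURCE B (Python) =====
-- def merge_as_routes(a, b):
--     # bucket-scatter: pre-create an empty set per key, then pour every
--     # individual route of both dicts into its bucket
--     r = {k: set() for d in (a, b) for k in d}
--     for d in (a, b):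
--         for k, v in d.items():
--             for x in v:
--                 r[k].add(x)
--     return r
-- ===== Notes on version B (the rewrite author's own statement) =====
-- stated objective: alternative
-- what changed: B never computes a key-union or a set union: it pre-creates one empty bucket per key occurring in either dict and then scatters the individual route strings of both dicts into their buckets element by element, where A iterates the key-union set and branches three ways with per-key set unions.
-- outside the precondition, e.g. on merge_as_routes({'k': ['x', 'x']}, {}): A returns {'k': ['x', 'x']}, B returns {'k': {'x'}}
import Mathlib
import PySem

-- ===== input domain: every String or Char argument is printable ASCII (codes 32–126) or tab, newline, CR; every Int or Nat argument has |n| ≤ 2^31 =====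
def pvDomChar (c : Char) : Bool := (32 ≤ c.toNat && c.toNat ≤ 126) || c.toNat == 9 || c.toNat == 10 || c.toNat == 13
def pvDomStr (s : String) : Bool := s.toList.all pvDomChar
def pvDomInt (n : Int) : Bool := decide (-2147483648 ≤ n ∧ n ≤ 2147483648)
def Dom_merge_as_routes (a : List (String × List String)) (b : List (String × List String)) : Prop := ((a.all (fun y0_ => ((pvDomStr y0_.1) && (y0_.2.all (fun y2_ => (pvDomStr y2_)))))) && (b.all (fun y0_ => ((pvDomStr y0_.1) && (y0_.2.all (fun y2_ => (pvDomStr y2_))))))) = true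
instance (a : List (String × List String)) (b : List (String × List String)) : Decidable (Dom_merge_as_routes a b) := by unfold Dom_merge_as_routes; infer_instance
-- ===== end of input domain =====

-- B pre-creates an empty bucket per key of either dict and scatters the individual route strings
-- into the buckets one element at a time, instead of A's key-union iteration with per-key set
-- unions; same cost, a different shape. Outputs are dicts of sets (compared ignoring order):
-- A's key-union set has Python hash iteration order; the ports render it in first-insertion order.

-- ===== PORT A =====
def merge_as_routes (a : List (String × List String)) (b : List (String × List String)) : List (String × List String) :=
  let da := PySem.Dict.ofList a
  let db := PySem.Dict.ofList b
  -- for i in a.keys() | b.keys(): three-way branch on membership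
  let ks : PySem.Set String := PySem.Set.union (PySem.Set.ofList (PySem.Dict.keys da)) (PySem.Dict.keys db)
  (ks.foldl (fun r i =>
      if da.contains i then
        if db.contains i then
          r.insert i (PySem.Set.union (PySem.Set.ofList (da.getD i [])) (db.getD i []))   -- r[i] = a[i] | b[i]
        else r.insert i (da.getD i [])                                                    -- r[i] = a[i]
      else r.insert i (db.getD i [])) PySem.Dict.empty).items                             -- r[i] = b[i]

-- ===== PORT B =====
-- for k, v in d.items(): for x in v: r[k].add(x)   — the inner mutation r[k].add(x) is
-- Dict.modify (k is always a pre-created bucket key, so Python's r[k] never raises)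
def pvFill (r : PySem.Dict String (List String)) (items : List (String × List String)) :
    PySem.Dict String (List String) :=
  items.foldl (fun r kv =>
    kv.2.foldl (fun r x => r.modify kv.1 [] (fun s => PySem.Set.add s x)) r) r

def merge_as_routes_alt (a : List (String × List String)) (b : List (String × List String)) : List (String × List String) :=
  let da := PySem.Dict.ofList a
  let db := PySem.Dict.ofList b
  -- r = {k: set() for d in (a, b) for k in d}
  let r0 := (da.keys ++ db.keys).foldl
      (fun r k => r.insert k (PySem.Set.empty : PySem.Set String)) PySem.Dict.empty
  -- for d in (a, b): …  (the two-element tuple loop, unrolled)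
  (pvFill (pvFill r0 da.items) db.items).items

-- ===== PRECONDITION & SPEC =====
-- Pre_ excludes association lists whose value lists contain duplicate elements: they do not
-- represent Python sets (a Python set argument is always duplicate-free), so on such malformed
-- lists A's verbatim value vs B's deduplicated bucket is a representation artefact.
def Pre_merge_as_routes (a : List (String × List String)) (b : List (String × List String)) : Prop :=
  (∀ p ∈ a, p.2.Nodup) ∧ (∀ p ∈ b, p.2.Nodup)
instance (a : List (String × List String)) (b : List (String × List String)) : Decidable (Pre_merge_as_routes a b) := by unfold Pre_merge_as_routes; infer_instance
def pvWitness_merge_as_routes : (List (String × List String)) × (List (String × List String)) :=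
  ([("10.0.0.0/8", ["65001"])], [("10.0.0.0/8", ["65002", "65001"]), ("192.168.0.0/16", [])])

def Spec_merge_as_routes (a : List (String × List String)) (b : List (String × List String)) (out : List (String × List String)) : Prop := out = merge_as_routes_alt a b
instance (a : List (String × List String)) (b : List (String × List String)) (out : List (String × List String)) : Decidable (Spec_merge_as_routes a b out) := by unfold Spec_merge_as_routes; infer_instance

-- ===== CLAIM (what is proved, stated in full; the proofs are below) =====
def Claim_equal_merge_as_routes : Prop := ∀ (a : List (String × List String)) (b : List (String × List String)), Dom_merge_as_routes a b → Pre_merge_as_routes a b → Spec_merge_as_routes a b (merge_as_routes a b)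

-- ===== LEMMAS AND PROOFS =====

-- A's per-key value, as a function of the key alone
def pvValA (da db : PySem.Dict String (List String)) (i : String) : List String :=
  if da.contains i then
    (if db.contains i then PySem.Set.union (PySem.Set.ofList (da.getD i [])) (db.getD i []) else da.getD i [])
  else db.getD i []

-- A's loop over the (nodup) key union, as a map over the keys
lemma pv_A_items (a b : List (String × List String)) :
    merge_as_routes a b =
      (PySem.Set.union (PySem.Set.ofList (PySem.Dict.keys (PySem.Dict.ofList a)))
        (PySem.Dict.keys (PySem.Dict.ofList b))).map
        (fun i => (i, pvValA (PySem.Dict.ofList a) (PySem.Dict.ofList b) i)) := by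
  show (List.foldl _ PySem.Dict.empty _).items = _
  set da := PySem.Dict.ofList a
  set db := PySem.Dict.ofList b
  set ks : List String := PySem.Set.union (PySem.Set.ofList (PySem.Dict.keys da)) (PySem.Dict.keys db) with hks
  have h1 : List.foldl (fun (r : PySem.Dict String (List String)) i =>
        if da.contains i then
          if db.contains i then
            r.insert i (PySem.Set.union (PySem.Set.ofList (da.getD i [])) (db.getD i []))
          else r.insert i (da.getD i [])
        else r.insert i (db.getD i [])) PySem.Dict.empty ks
      = List.foldl (fun r i => r.insert i (pvValA da db i)) PySem.Dict.empty ks := by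
    apply PySem.List.foldl_congr_mem
    intro acc x hx
    unfold pvValA
    split_ifs <;> rfl
  have hnd : List.Nodup ks := PySem.Set.nodup_union _ _ (PySem.Set.nodup_ofList _)
  have h2 := PySem.Dict.items_foldl_insert_fresh (l := ks) (k := fun i => i) (v := fun i => pvValA da db i)
      (d := PySem.Dict.empty) (by intro x hx; simp [PySem.Dict.contains_empty]) (by simpa using hnd)
  rw [h1, h2]
  simp [PySem.Dict.empty]

-- the bucket-creation pass: inserting [] for each key of M overwrites harmlessly on
-- already-created buckets and appends fresh ones
lemma pv_buckets (M : List String) :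
    ∀ (K : List String) (d : PySem.Dict String (List String)), K.Nodup →
      d.items = K.map (fun k => (k, ([] : List String))) →
      (M.foldl (fun r k => r.insert k (PySem.Set.empty : PySem.Set String)) d).items
        = (PySem.Set.update K M).map (fun k => (k, ([] : List String))) := by
  induction M with
  | nil => intro K d _ hd; simpa [PySem.Set.update] using hd
  | cons m t ih =>
      intro K d hK hd
      have hkeys : d.keys = K := by
        show d.items.map Prod.fst = K
        rw [hd]; simp [Function.comp_def]
      rw [List.foldl_cons, PySem.Set.update_cons]
      by_cases hm : m ∈ K
      · have hc : d.contains m = true := by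
          rw [PySem.Dict.contains_eq_decide_mem_keys, hkeys]; exact decide_eq_true hm
        have hit : (d.insert m (PySem.Set.empty : PySem.Set String)).items
            = K.map (fun k => (k, ([] : List String))) := by
          rw [PySem.Dict.items_insert_of_contains _ _ hc, hd, List.map_map]
          apply List.map_congr_left
          intro k hk
          by_cases hkm : k = m
          · simp [Function.comp, hkm, PySem.Set.empty]
          · simp [Function.comp, hkm]
        rw [ih K _ hK hit, PySem.Set.add_of_mem hm]
      · have hc : d.contains m = false := by
          rw [PySem.Dict.contains_eq_decide_mem_keys, hkeys]; exact decide_eq_false hm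
        have hit : (d.insert m (PySem.Set.empty : PySem.Set String)).items
            = (K ++ [m]).map (fun k => (k, ([] : List String))) := by
          rw [PySem.Dict.items_insert_of_not_contains _ _ hc, hd]
          simp [PySem.Set.empty]
        rw [ih (K ++ [m]) _ (hK.append (List.nodup_singleton m) (fun _ ha hb => hm ((List.mem_singleton.mp hb) ▸ ha))) hit, PySem.Set.add_of_not_mem hm]

-- scattering one value list into one existing bucket replaces it with its element-wise update
lemma pv_inner (v : List String) :
    ∀ (d : PySem.Dict String (List String)) (k : String), d.contains k = true → d.keys.Nodup →
      v.foldl (fun r x => r.modify k [] (fun s => PySem.Set.add s x)) d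
        = d.insert k (PySem.Set.update (d.getD k []) v) := by
  induction v with
  | nil =>
      intro d k hc hnd
      show d = d.insert k (d.getD k [])
      apply PySem.Dict.ext
      rw [PySem.Dict.items_insert_of_contains _ _ hc]
      have : ∀ p ∈ d.items, (if p.1 == k then (k, d.getD k []) else p) = p := by
        intro p hp
        by_cases hpk : p.1 = k
        · have : d.getD k [] = p.2 := by
            rw [← hpk]; exact PySem.Dict.getD_of_mem_items _ (by simpa using hp) hnd []
          simp only [hpk, BEq.rfl, if_true, this]
          rw [← hpk]
        · simp [hpk]
      rw [List.map_congr_left this, List.map_id']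
  | cons x t ih =>
      intro d k hc hnd
      rw [List.foldl_cons]
      have hmod : d.modify k [] (fun s => PySem.Set.add s x)
          = d.insert k (PySem.Set.add (d.getD k []) x) := rfl
      rw [hmod, ih _ k (by simp [PySem.Dict.contains_insert_self]) (PySem.Dict.nodup_keys_insert _ _ _ hnd),
        PySem.Dict.insert_insert_self, PySem.Dict.getD_insert_self, ← PySem.Set.update_cons]

-- one scatter pass over a dict's items updates each existing bucket with that dict's value list
lemma pv_fill_items (l : List (String × List String)) :
    ∀ (d : PySem.Dict String (List String)), d.keys.Nodup → (l.map Prod.fst).Nodup →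
      (∀ kv ∈ l, d.contains kv.1 = true) →
      (pvFill d l).items
        = d.items.map (fun q => (q.1,
            match (PySem.Dict.mk l).get? q.1 with
            | some v => PySem.Set.update q.2 v
            | none => q.2)) := by
  induction l with
  | nil =>
      intro d _ _ _
      simp [pvFill, PySem.Dict.get?]
  | cons p t ih =>
      intro d hnd hl hcont
      obtain ⟨pk, pv⟩ := p
      simp only [List.map_cons, List.nodup_cons] at hl
      obtain ⟨hp, ht⟩ := hl
      have hcp : d.contains pk = true := hcont (pk, pv) (by simp)
      show (List.foldl _ (pv.foldl (fun r x => r.modify pk [] (fun s => PySem.Set.add s x)) d) t).items = _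
      rw [pv_inner pv d pk hcp hnd]
      set d' := d.insert pk (PySem.Set.update (d.getD pk []) pv) with hd'
      have hkeys : d'.keys = d.keys := PySem.Dict.keys_insert_of_contains _ _ hcp
      have ih' := ih d' (by rw [hkeys]; exact hnd) ht (by
        intro kv hkv
        rw [PySem.Dict.contains_eq_decide_mem_keys, hkeys, ← PySem.Dict.contains_eq_decide_mem_keys]
        exact hcont kv (by simp [hkv]))
      show (pvFill d' t).items = _
      rw [ih', PySem.Dict.items_insert_of_contains _ _ hcp, List.map_map]
      apply List.map_congr_left
      intro q hq
      by_cases hqp : q.1 = pk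
      · have hget : d.getD pk [] = q.2 := by
          rw [← hqp]; exact PySem.Dict.getD_of_mem_items _ (by simpa using hq) hnd []
        have hnt : (PySem.Dict.mk t).get? pk = none := by
          rw [PySem.Dict.get?_eq_none_iff_not_mem_keys]
          simpa [PySem.Dict.keys] using hp
        simp [Function.comp, hqp, PySem.Dict.get?_mk_cons, hnt, hget]
      · have hbeq : (pk == q.1) = false := by simp [Ne.symm hqp]
        simp [Function.comp, hqp, PySem.Dict.get?_mk_cons, hbeq]

-- every value stored in a dict built by a fold of inserts is a value of the fed pair list
lemma pv_values_sub (l : List (String × List String)) :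
    ∀ (d : PySem.Dict String (List String)) (w : List String),
      w ∈ (l.foldl (fun d p => d.insert p.1 p.2) d).values → w ∈ d.values ∨ ∃ p ∈ l, w = p.2 := by
  induction l with
  | nil => intro d w h; exact Or.inl h
  | cons p t ih =>
      intro d w h
      rcases ih _ w h with h' | ⟨q, hq, hw⟩
      · rcases PySem.Dict.mem_values_insert _ _ _ _ h' with h'' | h''
        · exact Or.inr ⟨p, by simp, h''⟩
        · exact Or.inl h''
      · exact Or.inr ⟨q, by simp [hq], hw⟩

-- a value looked up in Dict.ofList a is duplicate-free when all of a's value lists are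
lemma pv_get_nodup (a : List (String × List String)) (ha : ∀ p ∈ a, p.2.Nodup)
    (k : String) (v : List String) (hv : (PySem.Dict.ofList a).get? k = some v) : v.Nodup := by
  have hmem : (k, v) ∈ (PySem.Dict.ofList a).items := PySem.Dict.mem_items_of_get?_eq_some _ hv
  have hval : v ∈ (PySem.Dict.ofList a).values := by
    show v ∈ (PySem.Dict.ofList a).items.map Prod.snd
    exact List.mem_map_of_mem hmem
  have := pv_values_sub a PySem.Dict.empty v hval
  rcases this with h | ⟨p, hp, hw⟩
  · simp [PySem.Dict.empty, PySem.Dict.values] at h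
  · exact hw ▸ ha p hp

-- B renders the same key list with the same per-key values
lemma pv_B_items (a b : List (String × List String))
    (ha : ∀ p ∈ a, p.2.Nodup) (hb : ∀ p ∈ b, p.2.Nodup) :
    merge_as_routes_alt a b =
      (PySem.Set.union (PySem.Set.ofList (PySem.Dict.keys (PySem.Dict.ofList a)))
        (PySem.Dict.keys (PySem.Dict.ofList b))).map
        (fun i => (i, pvValA (PySem.Dict.ofList a) (PySem.Dict.ofList b) i)) := by
  show (pvFill (pvFill _ _) _).items = _
  set da := PySem.Dict.ofList a with hda
  set db := PySem.Dict.ofList b with hdb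
  set U : List String := PySem.Set.union (PySem.Set.ofList da.keys) db.keys with hU
  have hnda : da.keys.Nodup := PySem.Dict.nodup_keys_ofList a
  have hndb : db.keys.Nodup := PySem.Dict.nodup_keys_ofList b
  have hndU : U.Nodup := PySem.Set.nodup_union _ _ (PySem.Set.nodup_ofList _)
  -- the bucket dict: one empty bucket per key of U, in order
  have hr0 : ((da.keys ++ db.keys).foldl
      (fun r k => r.insert k (PySem.Set.empty : PySem.Set String)) PySem.Dict.empty).items
      = U.map (fun k => (k, ([] : List String))) := by
    rw [pv_buckets (da.keys ++ db.keys) [] PySem.Dict.empty List.nodup_nil (by simp [PySem.Dict.empty])]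
    rw [hU, PySem.Set.union, ← PySem.Set.ofList_append]
    rfl
  set r0 := (da.keys ++ db.keys).foldl
      (fun r k => r.insert k (PySem.Set.empty : PySem.Set String)) PySem.Dict.empty with hr0def
  have hkeys0 : r0.keys = U := by
    show r0.items.map Prod.fst = U
    rw [hr0]; simp [Function.comp_def]
  have hsub : ∀ (d : PySem.Dict String (List String)), d.keys = U →
      ∀ kv ∈ db.items ++ da.items, d.contains kv.1 = true := by
    intro d hdk kv hkv
    rw [PySem.Dict.contains_eq_decide_mem_keys, hdk, hU]
    have hmem : kv.1 ∈ PySem.Set.union (PySem.Set.ofList da.keys) db.keys := by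
      rw [PySem.Set.mem_union]
      rcases List.mem_append.mp hkv with h | h
      · exact Or.inr (PySem.Dict.mem_keys_of_mem_items _ h)
      · exact Or.inl (by rw [PySem.Set.mem_ofList]; exact PySem.Dict.mem_keys_of_mem_items _ h)
    exact decide_eq_true hmem
  -- first scatter pass (a's items)
  have h1 := pv_fill_items da.items r0 (by rw [hkeys0]; exact hndU) hnda
      (fun kv hkv => hsub r0 hkeys0 kv (by simp [hkv]))
  rw [hr0, List.map_map] at h1
  have hkeys1 : (pvFill r0 da.items).keys = U := by
    show (pvFill r0 da.items).items.map Prod.fst = U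
    rw [h1]; simp [Function.comp_def]
  -- second scatter pass (b's items)
  have h2 := pv_fill_items db.items (pvFill r0 da.items) (by rw [hkeys1]; exact hndU) hndb
      (fun kv hkv => hsub _ hkeys1 kv (by simp [hkv]))
  rw [h1, List.map_map] at h2
  rw [h2]
  apply List.map_congr_left
  intro i hi
  have hmkA : PySem.Dict.mk da.items = da := rfl
  have hmkB : PySem.Dict.mk db.items = db := rfl
  rw [hmkA, hmkB]
  simp only [Function.comp, pvValA]
  cases hga : da.get? i with
  | some v =>
      have hca : da.contains i = true := by rw [PySem.Dict.contains_eq_isSome_get?, hga]; rfl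
      have hgda : da.getD i [] = v := by rw [PySem.Dict.getD_eq_get?_getD, hga]; rfl
      have hvn : v.Nodup := pv_get_nodup a ha i v (hda ▸ hga)
      cases hgb : db.get? i with
      | some w =>
          have hcb : db.contains i = true := by rw [PySem.Dict.contains_eq_isSome_get?, hgb]; rfl
          have hgdb : db.getD i [] = w := by rw [PySem.Dict.getD_eq_get?_getD, hgb]; rfl
          simp only [hca, hcb, if_true, hgda, hgdb]
          rfl
      | none =>
          have hcb : db.contains i = false := by rw [PySem.Dict.contains_eq_isSome_get?, hgb]; rfl
          simp only [hca, hcb, if_true, Bool.false_eq_true, if_false, hgda]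
          rw [show (PySem.Set.update [] v : List String) = v by
            rw [PySem.Set.update_nil_left]; exact PySem.Set.ofList_eq_self_of_nodup _ hvn]
  | none =>
      have hca : da.contains i = false := by rw [PySem.Dict.contains_eq_isSome_get?, hga]; rfl
      cases hgb : db.get? i with
      | some w =>
          have hcb : db.contains i = true := by rw [PySem.Dict.contains_eq_isSome_get?, hgb]; rfl
          have hgdb : db.getD i [] = w := by rw [PySem.Dict.getD_eq_get?_getD, hgb]; rfl
          have hwn : w.Nodup := pv_get_nodup b hb i w (hdb ▸ hgb)
          simp only [hca, Bool.false_eq_true, if_false, hgdb]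
          rw [show (PySem.Set.update [] w : List String) = w by
            rw [PySem.Set.update_nil_left]; exact PySem.Set.ofList_eq_self_of_nodup _ hwn]
      | none =>
          have hcb : db.contains i = false := by rw [PySem.Dict.contains_eq_isSome_get?, hgb]; rfl
          have : db.getD i [] = [] := by rw [PySem.Dict.getD_eq_get?_getD, hgb]; rfl
          simp only [hca, Bool.false_eq_true, if_false, this]

-- ===== VERDICT (by name: the statement is the Claim_ definition above) =====
theorem merge_as_routes_spec : Claim_equal_merge_as_routes := by
  intro a b _ hpre
  show merge_as_routes a b = merge_as_routes_alt a b
  rw [pv_A_items, pv_B_items a b hpre.1 hpre.2]
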